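-- pv_equiv track=rewrite | github.com/ablodge/amr-ccg-alignment | python/ccg.py | mark_first_arg
-- ===== SOURCE A (Python) =====
-- def mark_first_arg(tag):
--     depth = 0
--     index = -1
--     for i, c in enumerate(tag):
--         if c == '(':
--             depth += 1
--         elif c == ')':
--             depth -= 1
--         elif c in ['\\', '/'] and depth == 0:
--             index = i
--     if index > 0:
--         return tag[:index] + '*' + tag[index] + '*' + tag[index + 1:]
--     return tag
-- ===== SOURCE B (Python) =====
-- def mark_first_arg(tag):
--     # The last slash at forward depth 0 is found by scanning from the RIGHT:
--     # a slash at position i has forward depth 0 exactly when the running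
--     # suffix balance (closing minus opening parentheses seen so far) equals
--     # the whole string's count of closing minus count of opening parentheses.
--     # The first hit from the right wins.
--     target = tag.count(')') - tag.count('(')
--     d = 0
--     for i in range(len(tag) - 1, -1, -1):
--         c = tag[i]
--         if c == ')':
--             d += 1
--         elif c == '(':
--             d -= 1
--         elif (c == '\\' or c == '/') and d == target:
--             if i > 0:
--                 return tag[:i] + '*' + c + '*' + tag[i + 1:]
--             return tag
--     return tag
-- ===== Notes on version B (the rewrite author's own statement) =====
-- stated objective: alternative
-- what changed: B scans right-to-left with an early exit, locating the last top-level slash as the first position (from the right) where the running suffix balance of parentheses equals the string's total imbalance of closing over opening parentheses, instead of A's full left-to-right scan that keeps overwriting the index.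
import Mathlib
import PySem

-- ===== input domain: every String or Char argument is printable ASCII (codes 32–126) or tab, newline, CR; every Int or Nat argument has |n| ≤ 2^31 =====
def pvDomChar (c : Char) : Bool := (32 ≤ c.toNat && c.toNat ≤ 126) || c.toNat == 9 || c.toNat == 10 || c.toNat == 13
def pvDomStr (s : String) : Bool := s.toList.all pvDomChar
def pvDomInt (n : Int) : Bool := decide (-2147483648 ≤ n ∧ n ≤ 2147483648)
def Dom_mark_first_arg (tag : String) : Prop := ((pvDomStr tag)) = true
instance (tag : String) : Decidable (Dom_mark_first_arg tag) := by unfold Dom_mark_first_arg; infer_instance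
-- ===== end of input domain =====

-- B replaces A's full left-to-right scan by a right-to-left scan with early exit; equivalence is proved for ALL strings.

-- ===== PORT A =====
-- the body of A's for-loop over enumerate(tag), state = (depth, index)
def markStepA (st : Int × Int) (p : Int × Char) : Int × Int :=
  if p.2 = '(' then (st.1 + 1, st.2)
  else if p.2 = ')' then (st.1 - 1, st.2)
  else if (p.2 = '\\' ∨ p.2 = '/') ∧ st.1 = 0 then (st.1, p.1)
  else st

def mark_first_arg (tag : String) : String :=
  let st := (PySem.List.enumerate tag.toList 0).foldl markStepA (0, -1)
  if st.2 > 0 then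
    -- tag[st.2] never raises here (the index was produced by enumerate), so pyGetD is exact
    String.ofList (PySem.List.slice tag.toList none (some st.2) ++ ['*'] ++
      [PySem.List.pyGetD tag.toList st.2 ' '] ++ ['*'] ++
      PySem.List.slice tag.toList (some (st.2 + 1)) none)
  else tag

-- ===== PORT B =====
-- Source B's right-to-left loop 'for i in range(len(tag)-1, -1, -1): c = tag[i]; …' with its early
-- returns, ported as recursion over the reversed enumerated list (exact: enumerate pairs i with tag[i])
def markScanB (tag : String) (target : Int) : Int → List (Int × Char) → String
  | _, [] => tag
  | d, (i, c) :: r =>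
    if c = ')' then markScanB tag target (d + 1) r
    else if c = '(' then markScanB tag target (d - 1) r
    else if (c = '\\' ∨ c = '/') ∧ d = target then
      if i > 0 then
        String.ofList (PySem.List.slice tag.toList none (some i) ++ ['*', c, '*'] ++
          PySem.List.slice tag.toList (some (i + 1)) none)
      else tag
    else markScanB tag target d r

def mark_first_arg_alt (tag : String) : String :=
  markScanB tag ((PySem.Str.count tag ")" : Int) - (PySem.Str.count tag "(" : Int)) 0
    (PySem.List.enumerate tag.toList 0).reverse

-- ===== PRECONDITION & SPEC =====
def Spec_mark_first_arg (tag : String) (out : String) : Prop := out = mark_first_arg_alt tag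
instance (tag : String) (out : String) : Decidable (Spec_mark_first_arg tag out) := by unfold Spec_mark_first_arg; infer_instance

-- ===== CLAIM (what is proved, stated in full; the proofs are below) =====
def Claim_equal_mark_first_arg : Prop := ∀ (tag : String), Dom_mark_first_arg tag → Spec_mark_first_arg tag (mark_first_arg tag)

-- ===== LEMMAS AND PROOFS =====

-- paren contribution of one char to the forward depth
def pvContr (c : Char) : Int := if c = '(' then 1 else if c = ')' then -1 else 0
def pvFwd (e : List (Int × Char)) : Int := (e.map (fun p => pvContr p.2)).sum

-- A's post-processing of the final fold state
def pvPost (tag : String) (idx : Int) : String :=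
  if idx > 0 then
    String.ofList (PySem.List.slice tag.toList none (some idx) ++ ['*'] ++
      [PySem.List.pyGetD tag.toList idx ' '] ++ ['*'] ++
      PySem.List.slice tag.toList (some (idx + 1)) none)
  else tag

theorem markA_eq_post (tag : String) :
    mark_first_arg tag = pvPost tag ((PySem.List.enumerate tag.toList 0).foldl markStepA (0, -1)).2 := rfl

theorem depth_fold (e : List (Int × Char)) : ∀ (d0 i0 : Int),
    (e.foldl markStepA (d0, i0)).1 = d0 + pvFwd e := by
  induction e with
  | nil => intro d0 i0; simp [pvFwd]
  | cons p e ih =>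
    intro d0 i0
    obtain ⟨i, c⟩ := p
    simp only [List.foldl_cons, pvFwd, List.map_cons, List.sum_cons]
    by_cases h1 : c = '('
    · simp only [markStepA, h1, if_pos]
      rw [ih]; simp [pvContr, pvFwd]; ring
    · by_cases h2 : c = ')'
      · simp [markStepA, h2]
        rw [ih]; simp [pvContr, pvFwd]; ring
      · by_cases h3 : (c = '\\' ∨ c = '/') ∧ d0 = 0
        · simp [markStepA, h1, h2, h3]
          rw [ih]; simp [pvContr, pvFwd, h1, h2]
        · simp [markStepA, h1, h2, h3]
          rw [ih]; simp [pvContr, pvFwd, h1, h2]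

theorem mem_enumerate (cs : List Char) : ∀ (s : Int), ∀ p ∈ PySem.List.enumerate cs s,
    ∃ k : Nat, p.1 = s + (k : Int) ∧ cs[k]? = some p.2 := by
  induction cs with
  | nil => intro s p hp; simp [PySem.List.enumerate_nil] at hp
  | cons x t ih =>
    intro s p hp
    rw [PySem.List.enumerate_cons] at hp
    rcases List.mem_cons.mp hp with hp1 | hp1
    · exact ⟨0, by simp [hp1]⟩
    · obtain ⟨k, hk1, hk2⟩ := ih (s + 1) p hp1
      exact ⟨k + 1, by push_cast; omega, by simpa using hk2⟩

theorem fwd_enumerate (cs : List Char) : ∀ (s : Int),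
    pvFwd (PySem.List.enumerate cs s) = (cs.count '(' : Int) - (cs.count ')' : Int) := by
  induction cs with
  | nil => intro s; simp [PySem.List.enumerate_nil, pvFwd]
  | cons x t ih =>
    intro s
    rw [PySem.List.enumerate_cons]
    simp only [pvFwd, List.map_cons, List.sum_cons] at *
    rw [ih (s + 1)]
    by_cases h1 : x = '(' <;> by_cases h2 : x = ')' <;>
      simp [pvContr, h1, h2] <;> ring

theorem count_go_single (c : Char) : ∀ (fuel : Nat) (l : List Char) (acc : Nat), l.length ≤ fuel →
    PySem.Chars.count.go [c] fuel l acc = acc + l.count c := by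
  intro fuel
  induction fuel with
  | zero =>
    intro l acc h
    cases l with
    | nil => simp [PySem.Chars.count.go]
    | cons x t => simp at h
  | succ n ih =>
    intro l acc h
    cases l with
    | nil => simp [PySem.Chars.count.go]
    | cons x t =>
      by_cases hx : x = c
      · simp [PySem.Chars.count.go, hx, List.isPrefixOf, ih t (acc + 1) (by simpa using h)]
        omega
      · simp [PySem.Chars.count.go, List.isPrefixOf, hx, ih t acc (by simpa using h)]
        exact fun h => absurd h.symm hx

theorem count_single (cs : List Char) (c : Char) : PySem.Chars.count cs [c] = cs.count c := by
  simp [PySem.Chars.count, count_go_single c cs.length cs 0 le_rfl]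

theorem main_lemma (tag : String) (t d0 i0 : Int) (hi0 : i0 ≤ 0) (e : List (Int × Char)) :
    ∀ (d : Int), d = t + d0 + pvFwd e →
    (∀ p ∈ e, ∃ k : Nat, p.1 = (k : Int) ∧ tag.toList[k]? = some p.2) →
    pvPost tag ((e.foldl markStepA (d0, i0)).2) = markScanB tag t d e.reverse := by
  induction e using List.reverseRecOn with
  | nil =>
    intro d _ _
    simp [pvPost, markScanB, show ¬ i0 > 0 by omega]
  | append_singleton e x ih =>
    intro d hd hmem
    obtain ⟨i, c⟩ := x
    have hfwd : pvFwd (e ++ [(i, c)]) = pvFwd e + pvContr c := by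
      simp [pvFwd]
    rw [List.foldl_append]
    simp only [List.foldl_cons, List.foldl_nil]
    have hrev : (e ++ [(i, c)]).reverse = (i, c) :: e.reverse := by simp
    rw [hrev]
    have hmem' : ∀ p ∈ e, ∃ k : Nat, p.1 = (k : Int) ∧ tag.toList[k]? = some p.2 :=
      fun p hp => hmem p (by simp [hp])
    by_cases h1 : c = '('
    · have : markStepA (e.foldl markStepA (d0, i0)) (i, c) =
          ((e.foldl markStepA (d0, i0)).1 + 1, (e.foldl markStepA (d0, i0)).2) := by
        simp [markStepA, h1]
      rw [this]
      have : markScanB tag t d ((i, c) :: e.reverse) = markScanB tag t (d - 1) e.reverse := by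
        simp [markScanB, h1]
      rw [this]
      exact ih (d - 1) (by rw [hfwd] at hd; simp [pvContr, h1] at hd; omega) hmem'
    · by_cases h2 : c = ')'
      · have : markStepA (e.foldl markStepA (d0, i0)) (i, c) =
            ((e.foldl markStepA (d0, i0)).1 - 1, (e.foldl markStepA (d0, i0)).2) := by
          simp [markStepA, h2]
        rw [this]
        have : markScanB tag t d ((i, c) :: e.reverse) = markScanB tag t (d + 1) e.reverse := by
          simp [markScanB, h2]
        rw [this]
        exact ih (d + 1) (by rw [hfwd] at hd; simp [pvContr, h2] at hd; omega) hmem'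
      · have hc0 : pvContr c = 0 := by simp [pvContr, h1, h2]
        have hdep : (e.foldl markStepA (d0, i0)).1 = d0 + pvFwd e := depth_fold e d0 i0
        have hd' : d = t + d0 + pvFwd e := by rw [hfwd, hc0] at hd; omega
        by_cases hsl : c = '\\' ∨ c = '/'
        · by_cases hz : d0 + pvFwd e = 0
          · -- both scans fire on this slash
            have hA : markStepA (e.foldl markStepA (d0, i0)) (i, c) =
                ((e.foldl markStepA (d0, i0)).1, i) := by
              simp [markStepA, h1, h2, hsl, hdep, hz]
            rw [hA]
            have hdt : d = t := by omega
            obtain ⟨k, hk1, hk2⟩ := hmem (i, c) (by simp)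
            simp only at hk1 hk2
            have : markScanB tag t d ((i, c) :: e.reverse) =
                if i > 0 then
                  String.ofList (PySem.List.slice tag.toList none (some i) ++ ['*', c, '*'] ++
                    PySem.List.slice tag.toList (some (i + 1)) none)
                else tag := by
              simp [markScanB, h1, h2, hsl, hdt]
            rw [this]
            unfold pvPost
            by_cases hip : i > 0
            · simp only [hip, if_pos]
              have hget : PySem.List.pyGetD tag.toList i ' ' = c := by
                subst hk1
                rw [PySem.List.pyGetD_natCast]
                simp [List.getD, hk2]
              rw [hget]
              simp
            · simp [hip]
          · -- slash, but not at top level: both scans skip it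
            have hA : markStepA (e.foldl markStepA (d0, i0)) (i, c) =
                e.foldl markStepA (d0, i0) := by
              simp [markStepA, h1, h2, hdep, hz]
            rw [hA]
            have hdt : ¬ d = t := by omega
            have : markScanB tag t d ((i, c) :: e.reverse) = markScanB tag t d e.reverse := by
              simp [markScanB, h1, h2, hdt]
            rw [this]
            exact ih d hd' hmem'
        · -- ordinary character: both scans skip it
          have hA : markStepA (e.foldl markStepA (d0, i0)) (i, c) =
              e.foldl markStepA (d0, i0) := by
            simp [markStepA, h1, h2, hsl]
          rw [hA]
          have : markScanB tag t d ((i, c) :: e.reverse) = markScanB tag t d e.reverse := by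
            simp [markScanB, h1, h2, hsl]
          rw [this]
          exact ih d hd' hmem'

-- ===== VERDICT (by name: the statement is the Claim_ definition above) =====
theorem mark_first_arg_spec : Claim_equal_mark_first_arg := by
  intro tag _
  unfold Spec_mark_first_arg mark_first_arg_alt
  rw [markA_eq_post]
  apply main_lemma tag _ 0 (-1) (by omega)
  · have hcount : ∀ c : Char, (PySem.Str.count tag (String.singleton c) : Int) =
        (tag.toList.count c : Int) := by
      intro c
      norm_cast
      rw [show PySem.Str.count tag (String.singleton c) = PySem.Chars.count tag.toList [c] by
        simp [PySem.Str.count_eq]]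
      exact count_single tag.toList c
    rw [fwd_enumerate tag.toList 0]
    have h1 := hcount ')'
    have h2 := hcount '('
    rw [show (")" : String) = String.singleton ')' from rfl, show ("(" : String) = String.singleton '(' from rfl]
    omega
  · intro p hp
    obtain ⟨k, hk1, hk2⟩ := mem_enumerate tag.toList 0 p hp
    exact ⟨k, by omega, hk2⟩
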